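-- pv_equiv track=rewrite | github.com/Mamdasn/telegram-bot-protests-in-berlin | telegrambot/tools_collection.py | message_format_for_postgres
-- ===== SOURCE A (Python) =====
-- def message_format_for_postgres(queries, page_number=1, length_of_message=4000):
--     queries = [f"{q}\n" for q in queries]
--     queries_len = [len(q) for q in queries]
--     query_indexes_for_current_page = [[]]
--     number_of_pages = 1
--     for i, ql in enumerate(queries_len):
--         length_of_current_page = sum([queries_len[qicp] for qicp in query_indexes_for_current_page[-1]])
--         if length_of_current_page + ql > length_of_message:
--             if i == 0:
--                 break
--             number_of_pages += 1
--             query_indexes_for_current_page.append([])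
--
--         query_indexes_for_current_page[-1].append(i)
--
--     page = ''.join(
--                 [queries[i] for i in query_indexes_for_current_page[page_number-1]]
--                 ) if page_number <= number_of_pages else ''
--     return page, number_of_pages
-- ===== SOURCE B (Python) =====
-- def message_format_for_postgres(queries, page_number=1, length_of_message=4000):
--     number_of_pages = 1
--     current_length = 0
--     parts = []
--     for i, q in enumerate(queries):
--         ql = len(q) + 1
--         if current_length + ql > length_of_message:
--             if i == 0:
--                 break
--             number_of_pages += 1
--             current_length = 0
--         if number_of_pages == page_number:
--             parts.append(q + "\n")
--         current_length += ql
--     page = ''.join(parts) if page_number <= number_of_pages else ''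
--     return page, number_of_pages
-- ===== Notes on version B (the rewrite author's own statement) =====
-- stated objective: faster
-- what changed: B replaces A's per-query recomputation of the current page's length (a sum over the page's index list inside the loop) and the list-of-index-lists bookkeeping by a single pass with a running length that resets on page breaks, collecting the requested page's strings directly; Pre_ excludes negative page_number, where A either raises IndexError or returns a page counted from the end by Python negative indexing.
-- intended difference: For page_number = 0 with a nonempty queries list whose first query fits the limit, A's index page_number-1 = -1 wraps around and A returns the LAST page, while B returns '' as for any other out-of-range page number, which is the intended 'no such page' result. — e.g. on message_format_for_postgres(["a"], 0, 4000): A returns ("a\n", 1), B returns ("", 1)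
-- outside the precondition, e.g. on message_format_for_postgres(['a', 'b', 'c'], -1, 2): A returns ('b\n', 3), B returns ('', 3)
import Mathlib
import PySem

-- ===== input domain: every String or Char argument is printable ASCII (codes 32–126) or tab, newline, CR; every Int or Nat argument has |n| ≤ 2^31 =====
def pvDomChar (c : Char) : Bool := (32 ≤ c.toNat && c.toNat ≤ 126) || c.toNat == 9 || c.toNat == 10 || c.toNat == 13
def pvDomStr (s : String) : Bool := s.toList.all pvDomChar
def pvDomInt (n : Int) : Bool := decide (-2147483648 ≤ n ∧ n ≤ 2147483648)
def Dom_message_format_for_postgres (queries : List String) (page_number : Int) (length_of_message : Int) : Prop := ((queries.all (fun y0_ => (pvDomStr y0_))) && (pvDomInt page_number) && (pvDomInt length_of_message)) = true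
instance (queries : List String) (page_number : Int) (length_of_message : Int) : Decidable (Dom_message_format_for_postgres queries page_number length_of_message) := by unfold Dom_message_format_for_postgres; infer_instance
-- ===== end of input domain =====

-- B: one pass with a running page length (reset on page breaks) instead of A's per-query
-- re-summation over an index-list-of-lists; same return value on Pre_ except the stated
-- page_number = 0 wraparound corner (D_ below).

-- ===== PORT A =====
-- length_of_current_page = sum([queries_len[qicp] for qicp in query_indexes_for_current_page[-1]])
-- (indexes stored in the pages are always in range, so pyGetD's default is never consulted)
def pvCurLen (qlens : List Int) (qicp : List (List Int)) : Int :=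
  ((qicp.getLastD []).map (fun j => PySem.List.pyGetD qlens j 0)).sum

-- query_indexes_for_current_page[-1].append(i)  (the list is never empty in A)
def pvAppendLast (qicp : List (List Int)) (i : Int) : List (List Int) :=
  match qicp with
  | [] => [[i]]
  | [p] => [p ++ [i]]
  | p :: q :: rest => p :: pvAppendLast (q :: rest) i

-- the 'for i, ql in enumerate(queries_len)' loop, with 'break' returning the current state
def pvALoop (L : Int) (qlens : List Int) (rem : List Int) (i : Int)
    (qicp : List (List Int)) (pages : Int) : List (List Int) × Int :=
  match rem with
  | [] => (qicp, pages)
  | ql :: rest =>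
    let lcur := pvCurLen qlens qicp
    if lcur + ql > L then
      if i = 0 then (qicp, pages)
      else pvALoop L qlens rest (i + 1) (pvAppendLast (qicp ++ [[]]) i) (pages + 1)
    else pvALoop L qlens rest (i + 1) (pvAppendLast qicp i) pages

def message_format_for_postgres (queries : List String) (page_number : Int) (length_of_message : Int) : String × Int :=
  let queries2 := queries.map (fun q => q ++ "\n")
  let qlens := queries2.map (fun q => PySem.Str.len q)
  let r := pvALoop length_of_message qlens qlens 0 [[]] 1
  -- queries[page_number-1] would raise below -number_of_pages; Pre_ keeps the index valid,
  -- so the .getD [] never supplies its default inside Pre_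
  let page := if page_number ≤ r.2 then
      PySem.Str.join "" (((PySem.List.pyGet? r.1 (page_number - 1)).getD []).map
        (fun j => PySem.List.pyGetD queries2 j ""))
    else ""
  (page, r.2)

-- ===== PORT B =====
-- Source B's loop: running current_length, pages counter, parts of the requested page
def pvBLoop (pn L : Int) (rem : List String) (i pages cur : Int)
    (parts : List String) : List String × Int :=
  match rem with
  | [] => (parts, pages)
  | q :: rest =>
    let ql := PySem.Str.len q + 1
    if cur + ql > L then
      if i = 0 then (parts, pages)
      else
        let pages' := pages + 1
        let parts' := if pages' = pn then parts ++ [q ++ "\n"] else parts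
        pvBLoop pn L rest (i + 1) pages' ql parts'
    else
      let parts' := if pages = pn then parts ++ [q ++ "\n"] else parts
      pvBLoop pn L rest (i + 1) pages (cur + ql) parts'

def message_format_for_postgres_alt (queries : List String) (page_number : Int) (length_of_message : Int) : String × Int :=
  let r := pvBLoop page_number length_of_message queries 0 1 0 []
  (if page_number ≤ r.2 then PySem.Str.join "" r.1 else "", r.2)

-- ===== PRECONDITION & SPEC =====
-- Pre_ excludes negative page_number: there A raises IndexError when 1 - page_number exceeds the
-- number of pages (which depends on the packing) and otherwise returns a page counted from the
-- end by Python negative indexing — an accident of the index arithmetic no caller would rely on.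
def Pre_message_format_for_postgres (queries : List String) (page_number : Int) (length_of_message : Int) : Prop :=
  0 ≤ page_number
instance (queries : List String) (page_number : Int) (length_of_message : Int) : Decidable (Pre_message_format_for_postgres queries page_number length_of_message) := by unfold Pre_message_format_for_postgres; infer_instance

def pvWitness_message_format_for_postgres : List String × Int × Int := (["ab", "cd"], 1, 10)

-- For page_number = 0 with a nonempty queries list whose first query fits the limit, A's index
-- page_number-1 = -1 wraps around and A returns the LAST page, while B returns '' as for any
-- other out-of-range page number, which is the intended 'no such page' result.
def D_message_format_for_postgres (queries : List String) (page_number : Int) (length_of_message : Int) : Prop :=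
  page_number = 0 ∧
    queries.head?.any (fun q => decide (PySem.Str.len q + 1 ≤ length_of_message)) = true
instance (queries : List String) (page_number : Int) (length_of_message : Int) : Decidable (D_message_format_for_postgres queries page_number length_of_message) := by unfold D_message_format_for_postgres; infer_instance

def Spec_message_format_for_postgres (queries : List String) (page_number : Int) (length_of_message : Int) (out : String × Int) : Prop := ¬ D_message_format_for_postgres queries page_number length_of_message → out = message_format_for_postgres_alt queries page_number length_of_message
instance (queries : List String) (page_number : Int) (length_of_message : Int) (out : String × Int) : Decidable (Spec_message_format_for_postgres queries page_number length_of_message out) := by unfold Spec_message_format_for_postgres; infer_instance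

def pvDiffWitness_message_format_for_postgres : List String × Int × Int := (["a"], 0, 4000)
def pvDiffWitnessOut_message_format_for_postgres : (String × Int) × (String × Int) := (("a\n", 1), ("", 1))

-- ===== CLAIM (what is proved, stated in full; the proofs are below) =====
def Claim_unchanged_message_format_for_postgres : Prop := ∀ (queries : List String) (page_number : Int) (length_of_message : Int), Dom_message_format_for_postgres queries page_number length_of_message → Pre_message_format_for_postgres queries page_number length_of_message → Spec_message_format_for_postgres queries page_number length_of_message (message_format_for_postgres queries page_number length_of_message)
def Claim_changed_message_format_for_postgres : Prop := Dom_message_format_for_postgres (pvDiffWitness_message_format_for_postgres.1) (pvDiffWitness_message_format_for_postgres.2.1) (pvDiffWitness_message_format_for_postgres.2.2) ∧ Pre_message_format_for_postgres (pvDiffWitness_message_format_for_postgres.1) (pvDiffWitness_message_format_for_postgres.2.1) (pvDiffWitness_message_format_for_postgres.2.2) ∧ D_message_format_for_postgres (pvDiffWitness_message_format_for_postgres.1) (pvDiffWitness_message_format_for_postgres.2.1) (pvDiffWitness_message_format_for_postgres.2.2) ∧ message_format_for_postgres (pvDiffWitness_message_format_for_postgres.1) (pvDiffWitness_message_format_for_postgres.2.1)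 (pvDiffWitness_message_format_for_postgres.2.2) = pvDiffWitnessOut_message_format_for_postgres.1 ∧ message_format_for_postgres_alt (pvDiffWitness_message_format_for_postgres.1) (pvDiffWitness_message_format_for_postgres.2.1) (pvDiffWitness_message_format_for_postgres.2.2) = pvDiffWitnessOut_message_format_for_postgres.2 ∧ pvDiffWitnessOut_message_format_for_postgres.1 ≠ pvDiffWitnessOut_message_format_for_postgres.2
def Claim_exact_message_format_for_postgres : Prop := ∀ (queries : List String) (page_number : Int) (length_of_message : Int), Dom_message_format_for_postgres queries page_number length_of_message → Pre_message_format_for_postgres queries page_number length_of_message → D_message_format_for_postgres queries page_number length_of_message → message_format_for_postgres queries page_number length_of_message ≠ message_format_for_postgres_alt queries page_number length_of_message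

-- ===== LEMMAS AND PROOFS =====

-- the entry of queries_len for queries[j], and the page-extraction map
def pvLenF (q : String) : Int := PySem.Str.len (q ++ "\n")
def pvF (queries : List String) (j : Int) : String :=
  PySem.List.pyGetD (queries.map (fun q => q ++ "\n")) j ""

lemma pvLenF_eq (q : String) : pvLenF q = PySem.Str.len q + 1 := by
  simp [pvLenF]

lemma pvAppendLast_ne_nil (qicp : List (List Int)) (i : Int) : pvAppendLast qicp i ≠ [] := by
  match qicp with
  | [] => simp [pvAppendLast]
  | [p] => simp [pvAppendLast]
  | p :: q :: rest => simp [pvAppendLast]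

lemma length_pvAppendLast (qicp : List (List Int)) (i : Int) (h : qicp ≠ []) :
    (pvAppendLast qicp i).length = qicp.length := by
  match qicp with
  | [p] => simp [pvAppendLast]
  | p :: q :: rest => simp [pvAppendLast, length_pvAppendLast (q :: rest) i (by simp)]

lemma getLastD_default_irrel {α : Type} (l : List α) (h : l ≠ []) (d d' : α) :
    l.getLastD d = l.getLastD d' := by
  cases l with
  | nil => exact absurd rfl h
  | cons a t => rw [List.getLastD_eq_getLast? , List.getLastD_eq_getLast?, List.getLast?_eq_some_getLast h]; rfl

lemma getLastD_pvAppendLast (qicp : List (List Int)) (i : Int) (h : qicp ≠ []) :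
    (pvAppendLast qicp i).getLastD [] = qicp.getLastD [] ++ [i] := by
  match qicp with
  | [p] => simp [pvAppendLast]
  | p :: q :: rest =>
    have ih := getLastD_pvAppendLast (q :: rest) i (by simp)
    have h1 : (pvAppendLast (q :: rest) i).getLastD p = (pvAppendLast (q :: rest) i).getLastD [] :=
      getLastD_default_irrel _ (pvAppendLast_ne_nil _ _) _ _
    have h2 : (q :: rest).getLastD p = (q :: rest).getLastD [] :=
      getLastD_default_irrel _ (by simp) _ _
    show (p :: pvAppendLast (q :: rest) i).getLastD [] = (p :: q :: rest).getLastD [] ++ [i]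
    rw [List.getLastD_cons, h1, ih]
    conv_rhs => rw [List.getLastD_cons]
    rw [h2]

lemma getD_pvAppendLast (qicp : List (List Int)) (i : Int) (h : qicp ≠ []) (k : Nat) :
    (pvAppendLast qicp i).getD k [] =
      if k = qicp.length - 1 then qicp.getD k [] ++ [i] else qicp.getD k [] := by
  match qicp with
  | [p] =>
    cases k with
    | zero => simp [pvAppendLast]
    | succ n => simp [pvAppendLast]
  | p :: q :: rest =>
    cases k with
    | zero => simp [pvAppendLast]
    | succ n =>
      have ih := getD_pvAppendLast (q :: rest) i (by simp) n
      simp only [pvAppendLast, List.getD_cons_succ, List.length_cons]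
      rw [ih]
      by_cases hn : n = (q :: rest).length - 1
      · simp [hn]
      · have hn' : ¬ (n = rest.length) := by simp at hn; omega
        simp [hn']

lemma getD_append_nil_pad (qicp : List (List Int)) (k : Nat) :
    (qicp ++ [([] : List Int)]).getD k [] = qicp.getD k [] := by
  rcases lt_trichotomy k qicp.length with h | h | h
  · simp [List.getD_eq_getElem?_getD, List.getElem?_append_left h]
  · subst h
    simp [List.getD_eq_getElem?_getD, List.getElem?_eq_none (le_refl _)]
  · have h1 : (qicp ++ [([] : List Int)]).length ≤ k := by simp; omega
    simp [List.getD_eq_getElem?_getD, List.getElem?_eq_none h1,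
      List.getElem?_eq_none (by omega : qicp.length ≤ k)]

-- the main loop invariant: A's and B's loops march in step
lemma pvMain (pn L : Int) (hpn : 1 ≤ pn) (queries : List String) :
    ∀ (rest done : List String) (qicp : List (List Int)) (parts : List String),
    queries = done ++ rest → qicp ≠ [] →
    parts = (qicp.getD (pn - 1).toNat []).map (pvF queries) →
    (pvBLoop pn L rest (done.length : Int) (qicp.length : Int) (pvCurLen (queries.map pvLenF) qicp) parts).2
      = (pvALoop L (queries.map pvLenF) (rest.map pvLenF) (done.length : Int) qicp (qicp.length : Int)).2 ∧
    (pvALoop L (queries.map pvLenF) (rest.map pvLenF) (done.length : Int) qicp (qicp.length : Int)).2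
      = ((pvALoop L (queries.map pvLenF) (rest.map pvLenF) (done.length : Int) qicp (qicp.length : Int)).1.length : Int) ∧
    (pvBLoop pn L rest (done.length : Int) (qicp.length : Int) (pvCurLen (queries.map pvLenF) qicp) parts).1
      = ((pvALoop L (queries.map pvLenF) (rest.map pvLenF) (done.length : Int) qicp (qicp.length : Int)).1.getD (pn - 1).toNat []).map (pvF queries) := by
  intro rest
  induction rest with
  | nil =>
    intro done qicp parts hq hne hparts
    simp [pvALoop, pvBLoop, hparts]
  | cons q rest ih =>
    intro done qicp parts hq hne hparts
    have hqlen_at : PySem.List.pyGetD (queries.map pvLenF) ((done.length : Nat) : Int) 0 = pvLenF q := by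
      subst hq
      rw [PySem.List.pyGetD_natCast]
      simp [List.getD_eq_getElem?_getD]
    have hf_at : pvF queries ((done.length : Nat) : Int) = q ++ "\n" := by
      subst hq
      unfold pvF
      rw [PySem.List.pyGetD_natCast]
      simp [List.getD_eq_getElem?_getD]
    have hqlen1 : 1 ≤ qicp.length := List.length_pos_of_ne_nil hne
    simp only [List.map_cons, pvALoop, pvBLoop]
    rw [pvLenF_eq q]
    by_cases hov : pvCurLen (List.map pvLenF queries) qicp + (PySem.Str.len q + 1) > L
    swap
    · -- the query fits: append to the current page
      rw [if_neg hov, if_neg hov]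
      have hne' : pvAppendLast qicp (done.length : Int) ≠ [] := pvAppendLast_ne_nil _ _
      have hlen' : (pvAppendLast qicp (done.length : Int)).length = qicp.length :=
        length_pvAppendLast _ _ hne
      have hcur' : pvCurLen (queries.map pvLenF) (pvAppendLast qicp (done.length : Int))
          = pvCurLen (queries.map pvLenF) qicp + (PySem.Str.len q + 1) := by
        unfold pvCurLen
        rw [getLastD_pvAppendLast _ _ hne]
        simp [hqlen_at, pvLenF_eq]
      have hparts' :
          (if (qicp.length : Int) = pn then parts ++ [q ++ "\n"] else parts)
            = ((pvAppendLast qicp (done.length : Int)).getD (pn - 1).toNat []).map (pvF queries) := by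
        rw [getD_pvAppendLast _ _ hne]
        by_cases hc : (qicp.length : Int) = pn
        · have hp : (pn - 1).toNat = qicp.length - 1 := by omega
          rw [if_pos hp, if_pos hc]
          simp [hparts, hf_at]
        · have hp : ¬ ((pn - 1).toNat = qicp.length - 1) := by omega
          rw [if_neg hp, if_neg hc]
          simp [hparts]
      have H := ih (done ++ [q]) (pvAppendLast qicp (done.length : Int)) _
        (by rw [hq, List.append_assoc]; rfl) hne' hparts'
      rw [hlen'] at H
      have hcast1 : (((done ++ [q]).length : Nat) : Int) = (done.length : Int) + 1 := by
        simp
      rw [hcast1, hcur'] at H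
      exact H
    rw [if_pos hov, if_pos hov]
    by_cases hz : (done.length : Int) = 0
    · -- break: both loops return their current state
      rw [if_pos hz, if_pos hz]
      simp [hparts]
    · -- page break, then append to the fresh page
      rw [if_neg hz, if_neg hz]
      have hne2 : qicp ++ [([] : List Int)] ≠ [] := by simp
      have hne' : pvAppendLast (qicp ++ [([] : List Int)]) (done.length : Int) ≠ [] :=
        pvAppendLast_ne_nil _ _
      have hlen' : (pvAppendLast (qicp ++ [([] : List Int)]) (done.length : Int)).length
          = qicp.length + 1 := by
        rw [length_pvAppendLast _ _ hne2]; simp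
      have hcur' : pvCurLen (queries.map pvLenF) (pvAppendLast (qicp ++ [([] : List Int)]) (done.length : Int))
          = PySem.Str.len q + 1 := by
        unfold pvCurLen
        rw [getLastD_pvAppendLast _ _ hne2]
        have : (qicp ++ [([] : List Int)]).getLastD [] = ([] : List Int) := by
          simp [List.getLastD_eq_getLast?]
        rw [this]
        simp [hqlen_at, pvLenF_eq]
      have hparts' :
          (if (qicp.length : Int) + 1 = pn then parts ++ [q ++ "\n"] else parts)
            = ((pvAppendLast (qicp ++ [([] : List Int)]) (done.length : Int)).getD (pn - 1).toNat []).map (pvF queries) := by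
        rw [getD_pvAppendLast _ _ hne2, getD_append_nil_pad]
        by_cases hc : (qicp.length : Int) + 1 = pn
        · have hp : (pn - 1).toNat = (qicp ++ [([] : List Int)]).length - 1 := by
            simp; omega
          rw [if_pos hp, if_pos hc]
          have hout : qicp.getD (pn - 1).toNat [] = [] := by
            apply List.getD_eq_default
            omega
          simp [hparts, hf_at]
        · have hp : ¬ ((pn - 1).toNat = (qicp ++ [([] : List Int)]).length - 1) := by
            simp; omega
          rw [if_neg hp, if_neg hc]
          simp [hparts]
      have H := ih (done ++ [q]) (pvAppendLast (qicp ++ [([] : List Int)]) (done.length : Int)) _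
        (by rw [hq, List.append_assoc]; rfl) hne' hparts'
      rw [hlen'] at H
      have hcast1 : (((done ++ [q]).length : Nat) : Int) = (done.length : Int) + 1 := by
        simp
      have hcast2 : ((qicp.length + 1 : Nat) : Int) = (qicp.length : Int) + 1 := by push_cast; ring
      rw [hcast1, hcast2, hcur'] at H
      exact H

-- ===== TIGHTNESS: inside D_ the two programs differ everywhere =====

lemma pvJoin_cons_toList (x : String) (xs : List String) :
    (PySem.Str.join "" (x :: xs)).toList = x.toList ++ (PySem.Str.join "" xs).toList := by
  cases xs with
  | nil =>
    have h0 : (PySem.Str.join "" ([] : List String)).toList = [] := rfl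
    rw [PySem.Str.toList_join]
    simp only [List.map_cons, List.map_nil]
    rw [PySem.Chars.join_singleton, h0]
    simp
  | cons b t =>
    rw [PySem.Str.toList_join, PySem.Str.toList_join]
    simp only [List.map_cons]
    rw [PySem.Chars.join_cons_cons]
    simp

-- with pn = 0 the requested-page test never fires, so B's parts stay empty
lemma pvBLoop_parts_nil (L : Int) : ∀ (rem : List String) (i pages cur : Int), 1 ≤ pages →
    (pvBLoop 0 L rem i pages cur []).1 = [] := by
  intro rem
  induction rem with
  | nil => intro i pages cur _; simp [pvBLoop]
  | cons q rest ih =>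
    intro i pages cur hp
    simp only [pvBLoop]
    split_ifs with hov hz h1 h2
    · rfl
    · omega
    · exact ih _ _ _ (by omega)
    · omega
    · exact ih _ _ _ hp

-- once the current page holds a valid index, A's loop keeps its last page nonempty and valid
lemma pvALoop_keep (n L : Int) : ∀ (qlens rem : List Int) (i : Int)
    (qicp : List (List Int)) (pages : Int),
    0 ≤ i → i + (rem.length : Int) ≤ n → qicp ≠ [] →
    qicp.getLastD [] ≠ [] →
    (∀ j ∈ qicp.getLastD [], 0 ≤ j ∧ j < n) →
    (pvALoop L qlens rem i qicp pages).1 ≠ [] ∧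
    (pvALoop L qlens rem i qicp pages).1.getLastD [] ≠ [] ∧
    (∀ j ∈ (pvALoop L qlens rem i qicp pages).1.getLastD [], 0 ≤ j ∧ j < n) ∧
    pages ≤ (pvALoop L qlens rem i qicp pages).2 := by
  intro qlens rem
  induction rem with
  | nil =>
    intro i qicp pages _ _ hne hlast hval
    exact ⟨hne, hlast, hval, le_refl _⟩
  | cons ql rest ih =>
    intro i qicp pages hi hlen hne hlast hval
    simp only [List.length_cons] at hlen
    push_cast at hlen
    simp only [pvALoop]
    split_ifs with hov hz
    · exact ⟨hne, hlast, hval, le_refl _⟩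
    · have hne2 : qicp ++ [([] : List Int)] ≠ [] := by simp
      have hlast' : (pvAppendLast (qicp ++ [([] : List Int)]) i).getLastD [] = [i] := by
        rw [getLastD_pvAppendLast _ _ hne2]
        have : (qicp ++ [([] : List Int)]).getLastD [] = ([] : List Int) := by
          simp [List.getLastD_eq_getLast?]
        rw [this]
        simp
      have H := ih (i + 1) (pvAppendLast (qicp ++ [([] : List Int)]) i) (pages + 1)
        (by omega) (by omega) (pvAppendLast_ne_nil _ _)
        (by rw [hlast']; simp)
        (by rw [hlast']; intro j hj; simp at hj; subst hj; exact ⟨hi, by omega⟩)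
      exact ⟨H.1, H.2.1, H.2.2.1, by have := H.2.2.2; omega⟩
    · have hlast' : (pvAppendLast qicp i).getLastD [] = qicp.getLastD [] ++ [i] :=
        getLastD_pvAppendLast _ _ hne
      have H := ih (i + 1) (pvAppendLast qicp i) pages
        (by omega) (by omega) (pvAppendLast_ne_nil _ _)
        (by rw [hlast']; simp)
        (by rw [hlast']; intro j hj; rcases List.mem_append.mp hj with h | h
            · exact hval j h
            · simp at h; subst h; exact ⟨hi, by omega⟩)
      exact H


-- ===== VERDICT (by name: the statement is the Claim_ definition above) =====
lemma pvQlens_eq (queries : List String) :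
    (queries.map (fun q => q ++ "\n")).map (fun q => PySem.Str.len q) = queries.map pvLenF := by
  simp only [List.map_map]
  apply List.map_congr_left
  intro a _
  simp [pvLenF]
  decide

theorem message_format_for_postgres_spec : Claim_unchanged_message_format_for_postgres := by
  intro queries pn L _hdom hpre hnd
  by_cases h1 : 1 ≤ pn
  · -- the requested page number is positive: the two loops march in step (pvMain)
    have H := pvMain pn L h1 queries queries [] [[]] [] rfl (by simp)
      (by cases h : (pn - 1).toNat <;> simp)
    have hc0 : pvCurLen (queries.map pvLenF) [[]] = 0 := by simp [pvCurLen]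
    rw [hc0] at H
    norm_num at H
    obtain ⟨h2, h3, h4⟩ := H
    simp only [message_format_for_postgres, message_format_for_postgres_alt]
    rw [pvQlens_eq, ← h2]
    by_cases hle : pn ≤ (pvBLoop pn L queries 0 1 0 []).2
    · rw [if_pos hle, if_pos hle]
      congr 1
      rw [h4]
      have hlt : pn - 1 < ((pvALoop L (queries.map pvLenF) (queries.map pvLenF) 0 [[]] 1).1.length : Int) := by
        rw [← h3]; omega
      have h0 : (0 : Int) ≤ pn - 1 := by omega
      rw [PySem.List.pyGet?_eq_some_getElem _ h0 hlt]
      have hidx : (pn - 1).toNat = pn.toNat - 1 := by omega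
      have hlt' : pn.toNat - 1 < (pvALoop L (queries.map pvLenF) (queries.map pvLenF) 0 [[]] 1).1.length := by
        omega
      rw [List.getElem?_eq_getElem hlt']
      simp only [hidx, Option.getD_some]
      rfl
    · rw [if_neg hle, if_neg hle]
  · -- page_number = 0 (Pre_ gives 0 ≤ page_number): both return ('', number_of_pages)
    have h0 : pn = 0 := by unfold Pre_message_format_for_postgres at hpre; omega
    subst h0
    unfold D_message_format_for_postgres at hnd
    simp only [true_and] at hnd
    cases queries with
    | nil =>
      simp only [message_format_for_postgres, message_format_for_postgres_alt]
      simp [pvALoop, pvBLoop, PySem.List.pyGet?_neg_one]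
    | cons q qs =>
      have hfit : ¬ (PySem.Str.len q + 1 ≤ L) := by
        simp only [List.head?_cons, Option.any_some, decide_eq_true_eq] at hnd
        exact hnd
      have hgt : L < PySem.Str.len q + 1 := by omega
      have hgt' : L ≤ (q.length : Int) := by
        simp [pysem] at hgt
        omega
      simp only [message_format_for_postgres, message_format_for_postgres_alt]
      rw [pvQlens_eq]
      simp [pvALoop, pvBLoop, pvCurLen, pvLenF_eq, hgt', PySem.List.pyGet?_neg_one]

theorem message_format_for_postgres_changed : Claim_changed_message_format_for_postgres := by
  unfold Claim_changed_message_format_for_postgres; decide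

theorem message_format_for_postgres_tight : Claim_exact_message_format_for_postgres := by
  intro queries pn L _hdom _hpre hd
  unfold D_message_format_for_postgres at hd
  obtain ⟨hpn0, hany⟩ := hd
  subst hpn0
  cases queries with
  | nil => simp at hany
  | cons q qs =>
    have hfit : PySem.Str.len q + 1 ≤ L := by
      simp only [List.head?_cons, Option.any_some, decide_eq_true_eq] at hany
      exact hany
    intro hEq
    -- B's parts stay empty, so B's page is ""
    have hB1 : (pvBLoop 0 L (q :: qs) 0 1 0 []).1 = [] :=
      pvBLoop_parts_nil L (q :: qs) 0 1 0 (le_refl _)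
    have hBv : (message_format_for_postgres_alt (q :: qs) 0 L).1 = "" := by
      simp only [message_format_for_postgres_alt]
      rw [hB1]
      split <;> rfl
    -- A's page is the (nonempty) last page
    have hfit' : ((q.toList.length : Int)) + 1 ≤ L := by
      rw [PySem.Str.len_eq] at hfit
      omega
    have hq2 : q.toList.length = q.length := by
      simp
    have hovA : ¬ (pvCurLen ((PySem.Str.len q + 1) :: List.map pvLenF qs) [[]]
        + (PySem.Str.len q + 1) > L) := by
      simp [pvCurLen]
      omega
    have hAv : (message_format_for_postgres (q :: qs) 0 L).1 ≠ "" := by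
      simp only [message_format_for_postgres]
      rw [pvQlens_eq]
      simp only [List.map_cons, pvALoop]
      rw [pvLenF_eq q]
      rw [if_neg hovA]
      have hA := pvALoop_keep ((qs.length : Int) + 1) L
        ((PySem.Str.len q + 1) :: List.map pvLenF qs) (List.map pvLenF qs)
        (0 + 1) (pvAppendLast [[]] 0) 1
        (by omega) (by simp; omega) (pvAppendLast_ne_nil _ _)
        (by rw [show pvAppendLast [[]] (0 : Int) = [[0]] from rfl]; simp)
        (by rw [show pvAppendLast [[]] (0 : Int) = [[0]] from rfl]
            intro j hj; simp at hj; subst hj; omega)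
      obtain ⟨hne, hlast, hval, hpg⟩ := hA
      set r := pvALoop L ((PySem.Str.len q + 1) :: List.map pvLenF qs) (List.map pvLenF qs)
        (0 + 1) (pvAppendLast [[]] 0) 1 with hr
      rw [if_pos (by omega : (0 : Int) ≤ r.2)]
      have hidx : (0 : Int) - 1 = -1 := by omega
      rw [hidx, PySem.List.pyGet?_neg_one]
      have hlastD : r.1.getLast?.getD [] = r.1.getLastD [] := by
        rw [List.getLastD_eq_getLast?]
      rw [hlastD]
      obtain ⟨j, tl, hjtl⟩ := List.exists_cons_of_ne_nil hlast
      rw [hjtl]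
      have hjval := hval j (by rw [hjtl]; simp)
      have hrange : PySem.Raise.InRange ((q ++ "\n") :: List.map (fun q => q ++ "\n") qs).length j := by
        simp [PySem.Raise.InRange]
        omega
      have hmem := PySem.List.pyGetD_mem _ "" (h := hrange)
      have hform : ∃ a : String,
          PySem.List.pyGetD ((q ++ "\n") :: List.map (fun q => q ++ "\n") qs) j "" = a ++ "\n" := by
        rcases List.mem_cons.mp hmem with h | h
        · exact ⟨q, h⟩
        · obtain ⟨a, _, ha⟩ := List.mem_map.mp h
          exact ⟨a, ha.symm⟩
      obtain ⟨a, ha⟩ := hform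
      intro hcontra
      have htl := congrArg String.toList hcontra
      rw [List.map_cons, pvJoin_cons_toList, ha] at htl
      simp [String.toList_append] at htl
    exact hAv (by rw [hEq, hBv])
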